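-- pv_equiv track=rewrite | github.com/dheerajitgithub/Job-board | candidate/client/utils/cv_score.py | internship_or_not
-- ===== SOURCE A (Python) =====
-- def internship_or_not(resume_data):
--   Internship_text = ''
--   for i in range(len(resume_data.get('workExperience',{}))):
--     text =  resume_data.get('workExperience')[i]['originalJobTitle']
--     Internship_text = Internship_text + text + ' '
--   i1 = Internship_text.lower()
--   i1 = i1.replace(",",' ')
--   resume_text_list = i1.split(' ')
--   is_intern_or_internship_present = any(role.lower() in ['intern', 'internship'] for role in resume_text_list)
--   return is_intern_or_internship_present
-- ===== SOURCE B (Python) =====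
-- def internship_or_not(resume_data):
--     for entry in resume_data.get('workExperience', []):
--         title = entry['originalJobTitle'].lower().replace(',', ' ')
--         for word in title.split(' '):
--             if word in ('intern', 'internship'):
--                 return True
--     return False
-- ===== Notes on version B (the rewrite author's own statement) =====
-- stated objective: alternative
-- what changed: B drops A's accumulated Internship_text string and its whole-resume lowercase/replace/split/scan pipeline, instead scanning each work-experience title separately with an early return on the first 'intern'/'internship' token.
-- outside the precondition, e.g. on internship_or_not({'workExperience': [{'company': 'Acme'}]}): A raises KeyError, B raises KeyError
import Mathlib
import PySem

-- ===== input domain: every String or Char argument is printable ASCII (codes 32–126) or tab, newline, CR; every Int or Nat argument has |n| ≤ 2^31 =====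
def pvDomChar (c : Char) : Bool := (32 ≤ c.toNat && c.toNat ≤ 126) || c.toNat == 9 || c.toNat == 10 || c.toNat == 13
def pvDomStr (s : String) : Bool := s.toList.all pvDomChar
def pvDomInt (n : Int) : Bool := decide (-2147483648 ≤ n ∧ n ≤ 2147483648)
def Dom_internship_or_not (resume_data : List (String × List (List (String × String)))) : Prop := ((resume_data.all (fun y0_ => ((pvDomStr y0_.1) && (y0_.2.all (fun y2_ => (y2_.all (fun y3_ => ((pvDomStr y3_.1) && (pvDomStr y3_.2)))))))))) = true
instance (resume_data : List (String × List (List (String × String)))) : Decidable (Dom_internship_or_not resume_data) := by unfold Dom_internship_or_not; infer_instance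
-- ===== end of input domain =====

-- B replaces A's build-one-big-string-then-tokenize pipeline by a per-entry scan of each
-- normalized title (objective: alternative decomposition; no big intermediate string is built).


-- dict lookup (first match in insertion order), shared by both ports and Pre_
def pvLookup {α : Type} (d : List (String × α)) (k : String) : Option α :=
  (d.find? (fun p => p.1 == k)).map (·.2)

-- ===== PORT A =====
def internship_or_not (resume_data : List (String × List (List (String × String)))) : Bool :=
  let internship_text : String :=
    (PySem.List.pyRange 0 (PySem.List.len ((pvLookup resume_data "workExperience").getD []))).foldl
      (fun acc i =>
        acc ++ (pvLookup (PySem.List.pyGetD ((pvLookup resume_data "workExperience").getD []) i [])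
                  "originalJobTitle").getD "" ++ " ")
      ""
  let i1 := PySem.Str.lower internship_text
  let i2 := PySem.Str.replace i1 "," " "
  let resume_text_list := (PySem.Str.split? i2 " ").getD []
  resume_text_list.any (fun role => ["intern", "internship"].contains (PySem.Str.lower role))

-- ===== PORT B =====
def internship_or_not_alt (resume_data : List (String × List (List (String × String)))) : Bool :=
  ((pvLookup resume_data "workExperience").getD []).any (fun entry =>
    (((PySem.Str.split?
        (PySem.Str.replace (PySem.Str.lower ((pvLookup entry "originalJobTitle").getD "")) "," " ")
        " ").getD []).any
      (fun word => word == "intern" || word == "internship")))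

-- ===== PRECONDITION & SPEC =====
-- Pre_ excludes exactly the inputs where A raises KeyError: a work-experience entry without 'originalJobTitle'.
def Pre_internship_or_not (resume_data : List (String × List (List (String × String)))) : Prop :=
  (((pvLookup resume_data "workExperience").getD []).all
    (fun entry => (pvLookup entry "originalJobTitle").isSome)) = true
instance (resume_data : List (String × List (List (String × String)))) : Decidable (Pre_internship_or_not resume_data) := by unfold Pre_internship_or_not; infer_instance

def pvWitness_internship_or_not : (List (String × List (List (String × String)))) :=
  [("workExperience", [[("originalJobTitle", "Software Intern")]])]

def Spec_internship_or_not (resume_data : List (String × List (List (String × String)))) (out : Bool) : Prop := out = internship_or_not_alt resume_data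
instance (resume_data : List (String × List (List (String × String)))) (out : Bool) : Decidable (Spec_internship_or_not resume_data out) := by unfold Spec_internship_or_not; infer_instance

-- ===== CLAIM (what is proved, stated in full; the proofs are below) =====
def Claim_equal_internship_or_not : Prop := ∀ (resume_data : List (String × List (List (String × String)))), Dom_internship_or_not resume_data → Pre_internship_or_not resume_data → Spec_internship_or_not resume_data (internship_or_not resume_data)

-- ===== LEMMAS AND PROOFS =====

-- replace with a single-char pattern is a character map
def pvRepl (a b c : Char) : Char := if a = c then b else c

lemma replace_go_single (a b : Char) :
    ∀ (fuel : Nat) (l acc : List Char), l.length ≤ fuel →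
      PySem.Chars.replace.go [a] [b] fuel l acc = acc.reverse ++ l.map (pvRepl a b) := by
  intro fuel
  induction fuel with
  | zero => intro l acc h; simp at h; subst h; simp [PySem.Chars.replace.go]
  | succ n ih =>
    intro l acc h
    cases l with
    | nil => simp [PySem.Chars.replace.go]
    | cons c t =>
      simp only [PySem.Chars.replace.go]
      by_cases hc : a = c
      · subst hc
        rw [if_pos (by simp [List.isPrefixOf])]
        rw [show List.drop [a].length (a :: t) = t from rfl]
        rw [ih t _ (by simpa using h)]
        simp [pvRepl]
      · rw [if_neg (by simp [List.isPrefixOf]; exact hc)]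
        rw [ih t _ (by simpa using h)]
        simp [pvRepl, hc]

lemma replace_single (l : List Char) (a b : Char) :
    PySem.Chars.replace l [a] [b] = l.map (pvRepl a b) := by
  simp [PySem.Chars.replace, replace_go_single a b l.length l [] le_rfl]

-- the split-on-one-space tokenizer, as a structural recursion
def pvTok : List Char → List (List Char)
  | [] => [[]]
  | c :: rest => if c = ' ' then [] :: pvTok rest else (pvTok rest).modifyHead (c :: ·)

lemma pvTok_ne_nil (l : List Char) : pvTok l ≠ [] := by
  induction l with
  | nil => simp [pvTok]
  | cons c rest ih =>
    simp only [pvTok]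
    split
    · simp
    · cases h : pvTok rest with
      | nil => exact absurd h ih
      | cons w ws => simp [List.modifyHead]

lemma splitOn_go_space :
    ∀ (fuel : Nat) (l cur : List Char) (acc : List (List Char)), l.length < fuel →
      PySem.Chars.splitOn.go [' '] fuel l cur acc
        = acc.reverse ++ (pvTok l).modifyHead (cur.reverse ++ ·) := by
  intro fuel
  induction fuel with
  | zero => intro l cur acc h; omega
  | succ n ih =>
    intro l cur acc h
    cases l with
    | nil => simp [PySem.Chars.splitOn.go, pvTok, List.modifyHead]
    | cons c t =>
      simp only [PySem.Chars.splitOn.go]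
      by_cases hc : c = ' '
      · subst hc
        rw [if_pos (by simp [List.isPrefixOf])]
        rw [show List.drop [' '].length (' ' :: t) = t from rfl]
        rw [ih t _ _ (by simpa using h)]
        simp only [pvTok, reduceIte, List.modifyHead, List.reverse_cons, List.reverse_nil,
          List.nil_append, List.append_assoc]
        cases pvTok t <;> simp
      · rw [if_neg (by simp [List.isPrefixOf]; exact fun hh => hc hh.symm)]
        rw [ih t _ _ (by simpa using h)]
        have hne := pvTok_ne_nil t
        cases ht : pvTok t with
        | nil => exact absurd ht hne
        | cons w ws => simp [pvTok, hc, ht, List.modifyHead]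

lemma splitOn_space (l : List Char) : PySem.Chars.splitOn l [' '] = pvTok l := by
  rw [PySem.Chars.splitOn, splitOn_go_space (l.length + 1) l [] [] (by omega)]
  cases h : pvTok l with
  | nil => exact absurd h (pvTok_ne_nil l)
  | cons w ws => simp [List.modifyHead]

lemma pvTok_append_space (u v : List Char) : pvTok (u ++ ' ' :: v) = pvTok u ++ pvTok v := by
  induction u with
  | nil => simp [pvTok]
  | cons c t ih =>
    by_cases hc : c = ' '
    · subst hc; simp [pvTok, ih]
    · simp only [List.cons_append, pvTok, if_neg hc, ih]
      have := pvTok_ne_nil t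
      cases ht : pvTok t with
      | nil => exact absurd ht this
      | cons w ws => simp [List.modifyHead]

lemma pvTok_mem {l w : List Char} (hw : w ∈ pvTok l) : ∀ c ∈ w, c ∈ l := by
  induction l generalizing w with
  | nil => simp [pvTok] at hw; subst hw; simp
  | cons c t ih =>
    by_cases hc : c = ' '
    · subst hc
      simp only [pvTok, reduceIte, List.mem_cons] at hw
      rcases hw with h | h
      · subst h; simp
      · intro x hx; exact List.mem_cons_of_mem _ (ih h x hx)
    · simp only [pvTok, if_neg hc] at hw
      cases ht : pvTok t with
      | nil => exact absurd ht (pvTok_ne_nil t)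
      | cons w0 ws =>
        rw [ht] at hw
        simp only [List.modifyHead, List.mem_cons] at hw
        rcases hw with h | h
        · subst h
          intro x hx
          rcases List.mem_cons.mp hx with h | h
          · simp [h]
          · exact List.mem_cons_of_mem _ (ih (ht ▸ List.mem_cons_self) x h)
        · intro x hx
          exact List.mem_cons_of_mem _ (ih (ht ▸ List.mem_cons_of_mem _ h) x hx)

-- normalisation: lower then comma→space, as a single char map
def pvNorm (c : Char) : Char := pvRepl ',' ' ' (PySem.Chars.lowerChar c)

lemma char_le_toNat {a c : Char} (h : a ≤ c) : a.toNat ≤ c.toNat := by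
  rw [Char.le_def, UInt32.le_iff_toNat_le] at h; exact h

lemma lowerChar_lowerChar (c : Char) :
    PySem.Chars.lowerChar (PySem.Chars.lowerChar c) = PySem.Chars.lowerChar c := by
  unfold PySem.Chars.lowerChar PySem.Chars.isupper
  split
  · rename_i h
    rw [Bool.and_eq_true, decide_eq_true_eq, decide_eq_true_eq] at h
    have h1 : 65 ≤ c.toNat := char_le_toNat h.1
    have h2 : c.toNat ≤ 90 := char_le_toNat h.2
    have hv : (Char.ofNat (c.toNat + 32)).toNat = c.toNat + 32 := by
      rw [Char.toNat_ofNat, if_pos]; left; omega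
    rw [if_neg]
    intro hcon
    rw [Bool.and_eq_true, decide_eq_true_eq, decide_eq_true_eq] at hcon
    have hz := char_le_toNat hcon.2
    rw [hv] at hz
    have hZ : ('Z').toNat = 90 := by decide
    omega
  · rfl

lemma lowerChar_pvNorm (c : Char) : PySem.Chars.lowerChar (pvNorm c) = pvNorm c := by
  unfold pvNorm pvRepl
  split
  · decide
  · exact lowerChar_lowerChar c

-- token predicates of the two sides
def pvPA (w : List Char) : Bool :=
  (PySem.Chars.lower w == "intern".toList) || (PySem.Chars.lower w == "internship".toList)
def pvPB (w : List Char) : Bool := (w == "intern".toList) || (w == "internship".toList)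

lemma pA_eq_pB_on_norm (t : List Char) (w : List Char) (hw : w ∈ pvTok (t.map pvNorm)) :
    pvPA w = pvPB w := by
  have hsub : ∀ c ∈ w, c ∈ t.map pvNorm := pvTok_mem hw
  have hlow : PySem.Chars.lower w = w := by
    unfold PySem.Chars.lower
    conv_rhs => rw [← List.map_id w]
    apply List.map_congr_left
    intro c hc
    obtain ⟨x, _, rfl⟩ := List.mem_map.mp (hsub c hc)
    exact lowerChar_pvNorm x
  unfold pvPA pvPB
  rw [hlow]

lemma any_tok_norm (t : List Char) :
    (pvTok (t.map pvNorm)).any pvPA = (pvTok (t.map pvNorm)).any pvPB := by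
  rw [Bool.eq_iff_iff]
  simp only [List.any_eq_true]
  constructor
  · rintro ⟨w, hw, hp⟩; exact ⟨w, hw, by rw [← pA_eq_pB_on_norm t w hw]; exact hp⟩
  · rintro ⟨w, hw, hp⟩; exact ⟨w, hw, by rw [pA_eq_pB_on_norm t w hw]; exact hp⟩

lemma pvNorm_space : pvNorm ' ' = ' ' := by decide

lemma foldl_concat (ts : List (List Char)) (acc : List Char) :
    ts.foldl (fun a t => a ++ t ++ [' ']) acc = acc ++ ts.flatMap (fun t => t ++ [' ']) := by
  induction ts generalizing acc with
  | nil => simp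
  | cons t ts ih => simp [List.flatMap]

-- the concatenated-then-tokenized scan equals the per-title scan
lemma key (ts : List (List Char)) :
    ((pvTok ((ts.flatMap (fun t => t ++ [' '])).map pvNorm)).any pvPA)
      = ts.any (fun t => (pvTok (t.map pvNorm)).any pvPB) := by
  induction ts with
  | nil => decide
  | cons t ts ih =>
    rw [List.flatMap_cons, List.map_append, List.map_append]
    rw [show List.map pvNorm [' '] = [' '] from by simp [pvNorm_space]]
    rw [List.append_assoc, List.singleton_append, pvTok_append_space, List.any_append,
      any_tok_norm, ih, List.any_cons]

-- string-level bridges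
lemma toList_foldl {α : Type} (we : List α) (T : α → String) (s : String) :
    (we.foldl (fun acc e => acc ++ T e ++ " ") s).toList
      = we.foldl (fun acc e => acc ++ (T e).toList ++ [' ']) s.toList := by
  induction we generalizing s with
  | nil => rfl
  | cons e we ih =>
    simp only [List.foldl_cons, ih, String.toList_append]
    rw [show (" " : String).toList = [' '] from by decide]

lemma split_side (s : String) :
    ((PySem.Str.split? (PySem.Str.replace (PySem.Str.lower s) "," " ") " ").getD [])
      = (pvTok (s.toList.map pvNorm)).map String.ofList := by
  have h1 : (PySem.Str.replace (PySem.Str.lower s) "," " ").toList = s.toList.map pvNorm := by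
    rw [PySem.Str.toList_replace, PySem.Str.toList_lower]
    rw [show ("," : String).toList = [','] from by decide,
        show (" " : String).toList = [' '] from by decide]
    rw [replace_single, PySem.Chars.lower, List.map_map]
    rfl
  rw [PySem.Str.split?, h1]
  rw [show (" " : String).toList = [' '] from by decide]
  rw [PySem.Chars.split?]
  rw [if_neg (by simp)]
  rw [splitOn_space]
  rfl

lemma sideA (s : String) :
    (((PySem.Str.split? (PySem.Str.replace (PySem.Str.lower s) "," " ") " ").getD []).any
        (fun role => (["intern", "internship"] : List String).contains (PySem.Str.lower role)))
      = (pvTok (s.toList.map pvNorm)).any pvPA := by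
  rw [split_side, List.any_map]
  apply congrArg
  funext w
  show (["intern", "internship"] : List String).contains (PySem.Str.lower (String.ofList w)) = pvPA w
  rw [show PySem.Str.lower (String.ofList w) = String.ofList (PySem.Chars.lower w) from by
    apply String.toList_inj.mp; rw [PySem.Str.toList_lower]; simp [String.toList_ofList]]
  have h1 : (String.ofList (PySem.Chars.lower w) = "intern") ↔ (PySem.Chars.lower w = "intern".toList) := by
    rw [← String.toList_inj]; simp
  have h2 : (String.ofList (PySem.Chars.lower w) = "internship") ↔ (PySem.Chars.lower w = "internship".toList) := by
    rw [← String.toList_inj]; simp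
  simp only [pvPA, List.contains_cons, List.contains_nil, beq_eq_decide, Bool.or_false, h1, h2]

lemma sideB (s : String) :
    (((PySem.Str.split? (PySem.Str.replace (PySem.Str.lower s) "," " ") " ").getD []).any
        (fun word => word == "intern" || word == "internship"))
      = (pvTok (s.toList.map pvNorm)).any pvPB := by
  rw [split_side, List.any_map]
  apply congrArg
  funext w
  show ((String.ofList w == "intern") || (String.ofList w == "internship")) = pvPB w
  have h1 : (String.ofList w = "intern") ↔ (w = "intern".toList) := by
    rw [← String.toList_inj]; simp
  have h2 : (String.ofList w = "internship") ↔ (w = "internship".toList) := by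
    rw [← String.toList_inj]; simp
  simp only [pvPB, beq_eq_decide, h1, h2]

-- ===== VERDICT (by name: the statement is the Claim_ definition above) =====
theorem internship_or_not_spec : Claim_equal_internship_or_not := by
  intro rd _ _
  unfold Spec_internship_or_not internship_or_not internship_or_not_alt
  simp only []
  rw [PySem.List.foldl_pyRange_zero_pyGetD ((pvLookup rd "workExperience").getD []) []
      (fun acc e => acc ++ (pvLookup e "originalJobTitle").getD "" ++ " ") ""]
  rw [sideA]
  rw [toList_foldl]
  rw [show (("" : String).toList) = ([] : List Char) from rfl]
  rw [← List.foldl_map (f := fun e => ((pvLookup e "originalJobTitle").getD "" : String).toList)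
      (g := fun a t => a ++ t ++ [' '])]
  rw [foldl_concat, List.nil_append, key, List.any_map]
  have hf : ∀ e : List (String × String),
      (((PySem.Str.split?
          (PySem.Str.replace (PySem.Str.lower ((pvLookup e "originalJobTitle").getD "")) "," " ")
          " ").getD []).any (fun word => word == "intern" || word == "internship"))
        = (pvTok ((((pvLookup e "originalJobTitle").getD "").toList).map pvNorm)).any pvPB :=
    fun e => sideB _
  simp only [hf]
  rfl
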